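-- pv_equiv track=rewrite | github.com/david-wm-sanders/ck2sa | ck2sa/ck2save.py | parse_object_pairs
-- ===== SOURCE A (Python) =====
-- from collections import OrderedDict
--
-- IGNORED_KEYS = ("ironman", "count", "player_portrait", "game_speed", "mapmode", "dyn_title", "unit", "sub_unit",
--                 "delayed_event", "relation", "religion", "religion_group", "culture", "culture_group", "bloodline",
--                 "active_ambition", "active_focus", "active_plot", "active_faction", "combat", "war", "active_war",
--                 "previous_war", "next_outbreak_id", "disease_outbreak", "disease", "offmap_powers", "wonder_upgrade",
--                 "generated_societies", "generated_artifacts", "trade_route", "vc_data", "achievement")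
--
-- def parse_object_pairs(pairs):
--     def make_unique(key, d):
--         unique_key, counter = key, 0
--         while unique_key in d:
--             counter += 1
--             unique_key = f"{key}_{counter}"
--         return unique_key
--
--     d = OrderedDict()
--     for key, value in pairs:
--         if key in IGNORED_KEYS:
--             continue
--         if key in d:
--             key = make_unique(key, d)
--         d[key] = value
--     return d
-- ===== SOURCE B (Python) =====
-- IGNORED_KEYS = ("ironman", "count", "player_portrait", "game_speed", "mapmode", "dyn_title", "unit", "sub_unit",
--                 "delayed_event", "relation", "religion", "religion_group", "culture", "culture_group", "bloodline",
--                 "active_ambition", "active_focus", "active_plot", "active_faction", "combat", "war", "active_war",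
--                 "previous_war", "next_outbreak_id", "disease_outbreak", "disease", "offmap_powers", "wonder_upgrade",
--                 "generated_societies", "generated_artifacts", "trade_route", "vc_data", "achievement")
--
--
-- def _canon(key):
--     """Split key into (base, counter-suffix) iff key == f"{base}_{c}" for some int c >= 1."""
--     i = len(key)
--     while i > 0 and key[i - 1].isdigit():
--         i -= 1
--     if i > 0 and i < len(key) and key[i - 1] == '_' and key[i] != '0':
--         return key[:i - 1], key[i:]
--     return None
--
--
-- def parse_object_pairs(pairs):
--     ignored = frozenset(IGNORED_KEYS)
--     out = {}
--     plain = set()  # taken names that carry no counter suffix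
--     suff = {}      # base -> set of counter-suffix strings already taken for that base
--     ptr = {}       # base -> smallest counter still worth trying for a renamed duplicate
--     for key, value in pairs:
--         if key in ignored:
--             continue
--         parsed = _canon(key)
--         if parsed is None:
--             if key not in plain:
--                 plain.add(key)
--                 out[key] = value
--                 continue
--         else:
--             base, s = parsed
--             taken = suff.setdefault(base, set())
--             if s not in taken:
--                 taken.add(s)
--                 out[key] = value
--                 continue
--         # key is already taken: rename it with the smallest free counter
--         p = ptr.get(key, 1)
--         taken = suff.setdefault(key, set())
--         while str(p) in taken:
--             p += 1
--         taken.add(str(p))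
--         ptr[key] = p + 1
--         out[f"{key}_{p}"] = value
--     return out
-- ===== Notes on version B (the rewrite author's own statement) =====
-- stated objective: faster
-- what changed: B never probes candidate names against the result dict: it parses each key into (base, counter-suffix string), keeps per-base sets of taken suffixes plus a next-counter hint, and renames duplicates from those tables instead of rescanning key_1, key_2, ... against the dict.
import Mathlib
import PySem

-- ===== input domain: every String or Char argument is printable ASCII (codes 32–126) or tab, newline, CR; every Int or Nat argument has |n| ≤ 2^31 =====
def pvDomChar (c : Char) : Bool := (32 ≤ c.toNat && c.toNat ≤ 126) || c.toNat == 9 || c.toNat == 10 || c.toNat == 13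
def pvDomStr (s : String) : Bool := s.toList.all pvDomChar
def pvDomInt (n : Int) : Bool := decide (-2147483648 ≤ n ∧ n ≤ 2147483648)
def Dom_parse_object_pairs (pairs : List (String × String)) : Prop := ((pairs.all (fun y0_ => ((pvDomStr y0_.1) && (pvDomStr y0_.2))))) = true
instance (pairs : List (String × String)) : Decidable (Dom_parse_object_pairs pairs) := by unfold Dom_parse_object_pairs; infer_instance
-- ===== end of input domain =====

-- B never probes candidate names against the result dict: it splits each key into
-- (base, counter-suffix) and keeps per-base sets of taken suffixes plus a next-counter
-- hint, renaming duplicates from those tables (objective: faster on duplicate-heavy input).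

-- ===== PORT A =====
def pvIgnoredKeys : List String :=
  ["ironman", "count", "player_portrait", "game_speed", "mapmode", "dyn_title", "unit", "sub_unit",
   "delayed_event", "relation", "religion", "religion_group", "culture", "culture_group", "bloodline",
   "active_ambition", "active_focus", "active_plot", "active_faction", "combat", "war", "active_war",
   "previous_war", "next_outbreak_id", "disease_outbreak", "disease", "offmap_powers", "wonder_upgrade",
   "generated_societies", "generated_artifacts", "trade_route", "vc_data", "achievement"]

-- unique_key as a function of the counter: counter 0 is `key` itself, counter c is f"{key}_{c}"
def pvCand (key : String) (c : Nat) : String :=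
  if c = 0 then key else key ++ "_" ++ PySem.Int.toStr (c : Int)

-- the `while unique_key in d:` scan of make_unique, returning the final counter.
-- Fuel d.size + 1 always suffices: the candidates are pairwise distinct strings, so among
-- d.size + 1 of them one is not a key of d (proved below); the loop stops at the first such.
def pvUniq (d : PySem.Dict String String) (key : String) : Nat → Nat → Nat
  | 0, c => c
  | fuel + 1, c => if d.contains (pvCand key c) then pvUniq d key fuel (c + 1) else c

def pvStepA (d : PySem.Dict String String) (kv : String × String) : PySem.Dict String String :=
  if pvIgnoredKeys.contains kv.1 then d
  else
    let key := if d.contains kv.1 then pvCand kv.1 (pvUniq d kv.1 (d.size + 1) 0) else kv.1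
    d.insert key kv.2

def parse_object_pairs (pairs : List (String × String)) : List (String × String) :=
  (pairs.foldl pvStepA PySem.Dict.empty).items

-- ===== PORT B =====
def pvIgnoredSet : PySem.Set String := PySem.Set.ofList pvIgnoredKeys

-- _canon's scan: the `while i > 0 and key[i-1].isdigit(): i -= 1` loop, recursion on i
def pvScanDigits (cs : List Char) : Nat → Nat
  | 0 => 0
  | i + 1 => if PySem.Chars.isdigit (cs.getD i ' ') then pvScanDigits cs i else i + 1

-- port of _canon: split key into (base, counter-suffix) iff key == f"{base}_{c}", c >= 1
def pvCanon (key : String) : Option (String × String) :=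
  let cs := key.toList
  let i := pvScanDigits cs cs.length
  if 0 < i ∧ i < cs.length ∧ cs.getD (i - 1) ' ' = '_' ∧ cs.getD i ' ' ≠ '0' then
    some (String.ofList (cs.take (i - 1)), String.ofList (cs.drop i))
  else none

-- the `while str(p) in taken: p += 1` loop.  Fuel taken.length + 1 always suffices:
-- the counter strings are pairwise distinct, so one of taken.length + 1 of them is free.
def pvSkip (taken : PySem.Set String) : Nat → Nat → Nat
  | 0, p => p
  | f + 1, p => if taken.contains (PySem.Int.toStr (p : Int)) then pvSkip taken f (p + 1) else p

-- the rename tail of B's loop body (shared by both `if` arms, as in Source B)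
def pvRename (out : PySem.Dict String String) (suff : PySem.Dict String (PySem.Set String))
    (ptr : PySem.Dict String Nat) (kv : String × String) :
    PySem.Dict String String × PySem.Dict String (PySem.Set String) × PySem.Dict String Nat :=
  let taken := suff.getD kv.1 PySem.Set.empty
  let p := pvSkip taken (taken.length + 1) (ptr.getD kv.1 1)
  (out.insert (kv.1 ++ "_" ++ PySem.Int.toStr (p : Int)) kv.2,
   suff.insert kv.1 (taken.add (PySem.Int.toStr (p : Int))),
   ptr.insert kv.1 (p + 1))

-- B's loop body over the state (out, plain, suff, ptr)
def pvStepB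
    (st : PySem.Dict String String × PySem.Set String ×
          PySem.Dict String (PySem.Set String) × PySem.Dict String Nat)
    (kv : String × String) :
    PySem.Dict String String × PySem.Set String ×
    PySem.Dict String (PySem.Set String) × PySem.Dict String Nat :=
  if pvIgnoredSet.contains kv.1 then st
  else
    match pvCanon kv.1 with
    | none =>
      if ¬ st.2.1.contains kv.1 then
        (st.1.insert kv.1 kv.2, st.2.1.add kv.1, st.2.2.1, st.2.2.2)
      else
        let r := pvRename st.1 st.2.2.1 st.2.2.2 kv
        (r.1, st.2.1, r.2.1, r.2.2)
    | some (base, s) =>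
      if ¬ (st.2.2.1.getD base PySem.Set.empty).contains s then
        (st.1.insert kv.1 kv.2, st.2.1,
         st.2.2.1.insert base ((st.2.2.1.getD base PySem.Set.empty).add s), st.2.2.2)
      else
        let r := pvRename st.1 st.2.2.1 st.2.2.2 kv
        (r.1, st.2.1, r.2.1, r.2.2)

def parse_object_pairs_alt (pairs : List (String × String)) : List (String × String) :=
  (pairs.foldl pvStepB (PySem.Dict.empty, PySem.Set.empty, PySem.Dict.empty, PySem.Dict.empty)).1.items

-- ===== PRECONDITION & SPEC =====
def Spec_parse_object_pairs (pairs : List (String × String)) (out : List (String × String)) : Prop := out = parse_object_pairs_alt pairs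
instance (pairs : List (String × String)) (out : List (String × String)) : Decidable (Spec_parse_object_pairs pairs out) := by unfold Spec_parse_object_pairs; infer_instance

-- ===== CLAIM (what is proved, stated in full; the proofs are below) =====
def Claim_equal_parse_object_pairs : Prop := ∀ (pairs : List (String × String)), Dom_parse_object_pairs pairs → Spec_parse_object_pairs pairs (parse_object_pairs pairs)

-- ===== LEMMAS AND PROOFS =====

-- decimal digits of n, most significant first (what Nat.toDigits 10 computes)
def pvTd (n : ℕ) : List Char :=
  if n < 10 then [Nat.digitChar n]
  else pvTd (n / 10) ++ [Nat.digitChar (n % 10)]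
termination_by n
decreasing_by exact Nat.div_lt_self (by omega) (by norm_num)

lemma pvTd_lt (n : ℕ) (h : n < 10) : pvTd n = [Nat.digitChar n] := by
  rw [pvTd]; simp [h]

lemma pvTd_ge (n : ℕ) (h : ¬ n < 10) : pvTd n = pvTd (n / 10) ++ [Nat.digitChar (n % 10)] := by
  conv_lhs => rw [pvTd]
  simp [h]

lemma pvTd_ne_nil (n : ℕ) : pvTd n ≠ [] := by rw [pvTd]; split <;> simp

lemma pv_toDigitsCore_eq (f : ℕ) : ∀ (n : ℕ) (ds : List Char), n < f →
    Nat.toDigitsCore 10 f n ds = pvTd n ++ ds := by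
  induction f with
  | zero => intro n ds h; omega
  | succ f ih =>
    intro n ds h
    rw [Nat.toDigitsCore]
    by_cases h10 : n / 10 = 0
    · have hn : n < 10 := by omega
      simp [h10, pvTd_lt n hn, Nat.mod_eq_of_lt hn]
    · have hlt : n / 10 < f := by
        have := Nat.div_lt_self (by omega : 0 < n) (by norm_num : 1 < 10)
        omega
      have hge : ¬ n < 10 := by omega
      simp [h10, ih (n / 10) _ hlt, pvTd_ge n hge]

lemma pv_digitChar_inj (a b : ℕ) (ha : a < 10) (hb : b < 10)
    (h : Nat.digitChar a = Nat.digitChar b) : a = b := by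
  interval_cases a <;> interval_cases b <;> revert h <;> decide

lemma pvTd_inj : ∀ m n : ℕ, pvTd m = pvTd n → m = n := by
  intro m
  induction m using Nat.strong_induction_on with
  | _ m ih =>
    intro n h
    by_cases hm : m < 10 <;> by_cases hn : n < 10
    · rw [pvTd_lt m hm, pvTd_lt n hn] at h
      exact pv_digitChar_inj m n hm hn (List.singleton_injective h)
    · rw [pvTd_lt m hm, pvTd_ge n hn] at h
      cases hc : pvTd (n / 10) with
      | nil => exact absurd hc (pvTd_ne_nil _)
      | cons x l => rw [hc] at h; simp at h
    · rw [pvTd_ge m hm, pvTd_lt n hn] at h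
      cases hc : pvTd (m / 10) with
      | nil => exact absurd hc (pvTd_ne_nil _)
      | cons x l => rw [hc] at h; simp at h
    · rw [pvTd_ge m hm, pvTd_ge n hn] at h
      obtain ⟨h1, h2⟩ := List.append_inj' h (by simp)
      have hd := ih (m / 10) (Nat.div_lt_self (by omega) (by norm_num)) (n / 10) h1
      have hmod := pv_digitChar_inj (m % 10) (n % 10) (Nat.mod_lt _ (by norm_num))
        (Nat.mod_lt _ (by norm_num)) (List.singleton_injective h2)
      omega

lemma pv_toChars_nat (i : ℕ) : PySem.Int.toChars (i : ℤ) = pvTd i := by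
  have : ¬ ((i : ℤ) < 0) := by omega
  simp [PySem.Int.toChars, this, Nat.toDigits]
  rw [pv_toDigitsCore_eq (i + 1) i [] (by omega)]
  simp

lemma pv_toStr_inj (i j : ℕ) (h : PySem.Int.toStr (i : Int) = PySem.Int.toStr (j : Int)) : i = j := by
  have h' := congrArg String.toList h
  rw [PySem.Int.toList_toStr, PySem.Int.toList_toStr, pv_toChars_nat, pv_toChars_nat] at h'
  exact pvTd_inj i j h'

lemma pvTd_digits (n : ℕ) : ∀ c ∈ pvTd n, PySem.Chars.isdigit c = true := by
  induction n using Nat.strong_induction_on with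
  | _ n ih =>
    intro c hc
    by_cases hn : n < 10
    · rw [pvTd_lt n hn] at hc
      simp at hc
      subst hc
      interval_cases n <;> decide
    · rw [pvTd_ge n hn] at hc
      rcases List.mem_append.mp hc with h | h
      · exact ih (n / 10) (Nat.div_lt_self (by omega) (by norm_num)) c h
      · simp at h
        subst h
        have hm : n % 10 < 10 := Nat.mod_lt _ (by norm_num)
        set r := n % 10 with hr
        interval_cases r <;> decide

lemma pvTd_head_ne (n : ℕ) (h : 1 ≤ n) : (pvTd n).getD 0 ' ' ≠ '0' := by
  induction n using Nat.strong_induction_on with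
  | _ n ih =>
    by_cases hn : n < 10
    · rw [pvTd_lt n hn]
      interval_cases n <;> simp_all <;> decide
    · rw [pvTd_ge n hn]
      have hne := pvTd_ne_nil (n / 10)
      have hlen : 0 < (pvTd (n / 10)).length := List.length_pos_iff.mpr hne
      rw [List.getD_append _ _ _ _ hlen]
      exact ih (n / 10) (Nat.div_lt_self (by omega) (by norm_num)) (by omega)

-- toList of a candidate name
lemma pv_cand_toList (k : String) (j : ℕ) :
    (k ++ "_" ++ PySem.Int.toStr (j : Int)).toList = k.toList ++ '_' :: pvTd j := by
  simp only [String.toList_append, PySem.Int.toList_toStr, pv_toChars_nat]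
  simp [List.append_assoc]

lemma pv_getD_append_cons (xs ys : List Char) (c d : Char) :
    (xs ++ c :: ys).getD xs.length d = c := by simp

lemma pv_getD_append_cons_succ (xs ys : List Char) (c d : Char) :
    (xs ++ c :: ys).getD (xs.length + 1) d = ys.getD 0 d := by
  simp [List.getD, List.getElem?_append_right (show xs.length ≤ xs.length + 1 by omega)]

lemma pvScan_prefix (xs ys : List Char) : ∀ i, i ≤ xs.length →
    pvScanDigits (xs ++ ys) i = pvScanDigits xs i := by
  intro i
  induction i with
  | zero => intro _; rfl
  | succ n ih =>
    intro h
    have hg : (xs ++ ys).getD n ' ' = xs.getD n ' ' := List.getD_append _ _ _ _ (by omega)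
    simp only [pvScanDigits, hg]
    split
    · exact ih (by omega)
    · rfl

lemma pvScan_all_digits (cs : List Char) : ∀ ds : List Char,
    (∀ c ∈ ds, PySem.Chars.isdigit c = true) →
    pvScanDigits (cs ++ '_' :: ds) (cs.length + 1 + ds.length) = cs.length + 1 := by
  intro ds
  induction ds using List.reverseRecOn with
  | nil =>
    intro _
    show pvScanDigits (cs ++ '_' :: []) (cs.length + 1) = cs.length + 1
    have h_ : PySem.Chars.isdigit '_' = false := by decide
    simp only [pvScanDigits, pv_getD_append_cons, h_, Bool.false_eq_true, if_false]
  | append_singleton ds c ih =>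
    intro hd
    have hds : ∀ x ∈ ds, PySem.Chars.isdigit x = true := fun x hx => hd x (by simp [hx])
    have hc : PySem.Chars.isdigit c = true := hd c (by simp)
    have hre : cs ++ '_' :: (ds ++ [c]) = (cs ++ '_' :: ds) ++ [c] := by simp
    have hlen2 : (cs ++ '_' :: ds).length = cs.length + 1 + ds.length := by simp; omega
    have hlen : cs.length + 1 + (ds ++ [c]).length = (cs ++ '_' :: ds).length + 1 := by
      simp; omega
    rw [hre, hlen]
    have hg : ((cs ++ '_' :: ds) ++ [c]).getD (cs ++ '_' :: ds).length ' ' = c :=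
      pv_getD_append_cons _ [] c ' '
    simp only [pvScanDigits, hg, hc, if_true]
    rw [pvScan_prefix _ _ _ (le_refl _), hlen2]
    exact ih hds

-- L1: canonical decomposition of a generated name f"{k}_{j}", j >= 1
lemma pv_canon_cand (k : String) (j : ℕ) (hj : 1 ≤ j) :
    pvCanon (k ++ "_" ++ PySem.Int.toStr (j : Int)) = some (k, PySem.Int.toStr (j : Int)) := by
  have hts := pv_cand_toList k j
  simp only [pvCanon, hts]
  have hlen : (k.toList ++ '_' :: pvTd j).length = k.toList.length + 1 + (pvTd j).length := by
    simp; omega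
  have hscan : pvScanDigits (k.toList ++ '_' :: pvTd j) (k.toList ++ '_' :: pvTd j).length
      = k.toList.length + 1 := by
    rw [hlen]; exact pvScan_all_digits _ _ (pvTd_digits j)
  rw [hscan]
  have hpos : 0 < (pvTd j).length := List.length_pos_iff.mpr (pvTd_ne_nil j)
  have hsub : k.toList.length + 1 - 1 = k.toList.length := by omega
  have c1 : 0 < k.toList.length + 1 := by omega
  have c2 : k.toList.length + 1 < (k.toList ++ '_' :: pvTd j).length := by rw [hlen]; omega
  have c3 : (k.toList ++ '_' :: pvTd j).getD (k.toList.length + 1 - 1) ' ' = '_' := by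
    rw [hsub]; exact pv_getD_append_cons _ _ _ _
  have c4 : (k.toList ++ '_' :: pvTd j).getD (k.toList.length + 1) ' ' ≠ '0' := by
    rw [pv_getD_append_cons_succ]; exact pvTd_head_ne j hj
  rw [if_pos ⟨c1, c2, c3, c4⟩]
  have t1 : (k.toList ++ '_' :: pvTd j).take (k.toList.length + 1 - 1) = k.toList := by
    rw [hsub]; exact List.take_left
  have t2 : (k.toList ++ '_' :: pvTd j).drop (k.toList.length + 1) = pvTd j := by
    simp [List.drop_append]
  rw [t1, t2]
  have t3 : pvTd j = (PySem.Int.toStr (j : Int)).toList := by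
    rw [PySem.Int.toList_toStr, pv_toChars_nat]
  rw [t3, String.ofList_toList, String.ofList_toList]

-- L2: reconstruction of a canonically-split name
lemma pv_canon_recon (n b s : String) (h : pvCanon n = some (b, s)) :
    n.toList = b.toList ++ '_' :: s.toList := by
  simp only [pvCanon] at h
  split_ifs at h with hcond
  · obtain ⟨hc1, hc2, hc3, hc4⟩ := hcond
    have h' := Option.some.inj h
    have hb : String.ofList (n.toList.take (pvScanDigits n.toList n.toList.length - 1)) = b :=
      congrArg Prod.fst h'
    have hs : String.ofList (n.toList.drop (pvScanDigits n.toList n.toList.length)) = s :=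
      congrArg Prod.snd h'
    rw [← hb, ← hs, String.toList_ofList, String.toList_ofList]
    have hlt : pvScanDigits n.toList n.toList.length - 1 < n.toList.length :=
      Nat.lt_of_le_of_lt (Nat.sub_le _ 1) hc2
    have hget : n.toList[pvScanDigits n.toList n.toList.length - 1] = '_' := by
      rw [← List.getD_eq_getElem n.toList ' ' hlt]
      exact hc3
    have hdrop : n.toList.drop (pvScanDigits n.toList n.toList.length - 1)
        = '_' :: n.toList.drop (pvScanDigits n.toList n.toList.length) := by
      have hi1 : pvScanDigits n.toList n.toList.length - 1 + 1
          = pvScanDigits n.toList n.toList.length := by omega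
      rw [List.drop_eq_getElem_cons hlt, hget, hi1]
    conv_lhs => rw [← List.take_append_drop (pvScanDigits n.toList n.toList.length - 1) n.toList,
      hdrop]

lemma pv_canon_inj (n m b s : String) (hn : pvCanon n = some (b, s))
    (hm : pvCanon m = some (b, s)) : n = m := by
  apply String.toList_inj.mp
  rw [pv_canon_recon n b s hn, pv_canon_recon m b s hm]

-- Set helpers
lemma pv_contains_add_self {s : PySem.Set String} {x : String} :
    (s.add x).contains x = true :=
  (PySem.Set.contains_iff _ _).mpr ((PySem.Set.mem_add s x x).mpr (Or.inr rfl))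

lemma pv_contains_add_ne {s : PySem.Set String} {x y : String} (h : y ≠ x) :
    (s.add x).contains y = s.contains y := by
  rw [Bool.eq_iff_iff, PySem.Set.contains_iff, PySem.Set.contains_iff, PySem.Set.mem_add]
  simp [h]

lemma pv_contains_add_mono {s : PySem.Set String} {x y : String}
    (h : s.contains y = true) : (s.add x).contains y = true :=
  (PySem.Set.contains_iff _ _).mpr ((PySem.Set.mem_add s x y).mpr
    (Or.inl ((PySem.Set.contains_iff _ _).mp h)))

-- the skip loop finds the first free counter
lemma pvSkip_eq (taken : PySem.Set String) (j0 : ℕ)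
    (hfree : taken.contains (PySem.Int.toStr (j0 : Int)) = false) :
    ∀ (fuel c : ℕ), (∀ i, c ≤ i → i < j0 → taken.contains (PySem.Int.toStr (i : Int)) = true) →
      c ≤ j0 → j0 < c + fuel → pvSkip taken fuel c = j0 := by
  intro fuel
  induction fuel with
  | zero => intro c _ h1 h2; omega
  | succ f ih =>
    intro c hmin h1 h2
    by_cases hc : c = j0
    · subst hc
      show (if taken.contains (PySem.Int.toStr (c : Int)) = true then pvSkip taken f (c + 1) else c) = c
      rw [hfree]
      simp
    · have hu : taken.contains (PySem.Int.toStr (c : Int)) = true := hmin c le_rfl (by omega)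
      show (if taken.contains (PySem.Int.toStr (c : Int)) = true then pvSkip taken f (c + 1) else c) = j0
      rw [hu, if_pos rfl]
      exact ih (c + 1) (fun i hi hij => hmin i (by omega) hij) (by omega) (by omega)

-- enough fuel: all of [c, j0) taken forces j0 ≤ c + |taken|
lemma pv_skip_bound (taken : PySem.Set String) (c j0 : ℕ)
    (h : ∀ i, c ≤ i → i < j0 → taken.contains (PySem.Int.toStr (i : Int)) = true) :
    j0 ≤ c + taken.length := by
  by_contra hlt
  push Not at hlt
  have hsub : ((List.range' c (taken.length + 1)).map
      (fun i : Nat => PySem.Int.toStr (i : Int))) ⊆ taken := by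
    intro x hx
    obtain ⟨i, hi, rfl⟩ := List.mem_map.mp hx
    obtain ⟨hi1, hi2⟩ := List.mem_range'_1.mp hi
    exact (PySem.Set.contains_iff _ _).mp (h i hi1 (by omega))
  have hnd : ((List.range' c (taken.length + 1)).map
      (fun i : Nat => PySem.Int.toStr (i : Int))).Nodup := by
    refine (List.nodup_range').map ?_
    intro a b hab
    exact pv_toStr_inj a b hab
  have h1 := List.toFinset_card_of_nodup hnd
  have h2 : ((List.range' c (taken.length + 1)).map
      (fun i : Nat => PySem.Int.toStr (i : Int))).toFinset ⊆ taken.toFinset := by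
    intro x hx
    simp only [List.mem_toFinset] at *
    exact hsub hx
  have h3 := Finset.card_le_card h2
  have h4 := List.toFinset_card_le (taken : List String)
  have h5 : ((List.range' c (taken.length + 1)).map
      (fun i : Nat => PySem.Int.toStr (i : Int))).length = taken.length + 1 := by simp
  rw [h5] at h1
  omega

-- A-side: among d.size + 1 candidates one is free
lemma pvCand_inj (key : String) : Function.Injective (pvCand key) := by
  intro a b h
  by_cases ha : a = 0 <;> by_cases hb : b = 0
  · omega
  · simp only [pvCand, if_pos ha, if_neg hb] at h
    have := congrArg (fun s => s.toList.length) h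
    simp only [pv_cand_toList] at this
    simp at this
  · simp only [pvCand, if_neg ha, if_pos hb] at h
    have := congrArg (fun s => s.toList.length) h
    simp only [pv_cand_toList] at this
    simp at this
  · simp only [pvCand, if_neg ha, if_neg hb] at h
    have h' := congrArg String.toList h
    rw [pv_cand_toList, pv_cand_toList] at h'
    have := List.append_cancel_left h'
    simp at this
    exact pvTd_inj a b this

lemma pv_keys_length (d : PySem.Dict String String) : d.keys.length = d.size := by
  simp [PySem.Dict.keys, PySem.Dict.size]

lemma pv_exists_free (d : PySem.Dict String String) (key : String) :
    ∃ j, j ≤ d.size ∧ d.contains (pvCand key j) = false := by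
  by_contra hc
  push Not at hc
  have hall : ∀ j ≤ d.size, d.contains (pvCand key j) = true := by
    intro j hj
    cases h : d.contains (pvCand key j) with
    | false => exact absurd h (hc j hj)
    | true => rfl
  have hsub : ((List.range (d.size + 1)).map (pvCand key)) ⊆ d.keys := by
    intro x hx
    obtain ⟨j, hj, rfl⟩ := List.mem_map.mp hx
    have := hall j (by simpa using Nat.lt_succ_iff.mp (List.mem_range.mp hj))
    rw [PySem.Dict.contains_eq_decide_mem_keys] at this
    simpa using this
  have hnd : ((List.range (d.size + 1)).map (pvCand key)).Nodup :=
    (List.nodup_range).map (pvCand_inj key)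
  have h1 := List.toFinset_card_of_nodup hnd
  have h2 : ((List.range (d.size + 1)).map (pvCand key)).toFinset ⊆ d.keys.toFinset := by
    intro x hx; simp only [List.mem_toFinset] at *; exact hsub hx
  have h3 := Finset.card_le_card h2
  have h4 := List.toFinset_card_le d.keys
  have h5 := pv_keys_length d
  simp at h1
  omega

lemma pvUniq_eq (d : PySem.Dict String String) (key : String) (j : ℕ)
    (hj : d.contains (pvCand key j) = false)
    (hmin : ∀ i < j, d.contains (pvCand key i) = true) :
    ∀ (fuel c : ℕ), c ≤ j → j < c + fuel → pvUniq d key fuel c = j := by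
  intro fuel
  induction fuel with
  | zero => intro c h1 h2; omega
  | succ f ih =>
    intro c h1 h2
    by_cases hcj : c = j
    · subst hcj
      simp [pvUniq, hj]
    · have hlt : c < j := by omega
      simp [pvUniq, hmin c hlt]
      exact ih (c + 1) (by omega) (by omega)

-- the name-usedness table that B maintains, read back as a predicate on names
def pvUsedB (plain : PySem.Set String) (suff : PySem.Dict String (PySem.Set String))
    (n : String) : Bool :=
  (pvCanon n).elim (plain.contains n)
    (fun bs => (suff.getD bs.1 PySem.Set.empty).contains bs.2)

-- the coupling invariant between A's dict and B's state
def pvInv (d : PySem.Dict String String)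
    (st : PySem.Dict String String × PySem.Set String ×
          PySem.Dict String (PySem.Set String) × PySem.Dict String Nat) : Prop :=
  d = st.1 ∧
  (∀ n, d.contains n = pvUsedB st.2.1 st.2.2.1 n) ∧
  (∀ (b : String) (j : ℕ), 1 ≤ j → j < st.2.2.2.getD b 1 →
    (st.2.2.1.getD b PySem.Set.empty).contains (PySem.Int.toStr (j : Int)) = true) ∧
  (∀ b : String, 1 ≤ st.2.2.2.getD b 1)

-- the collision case: A's probe and B's table rename insert the same fresh name
lemma pv_collision (d : PySem.Dict String String) (plain : PySem.Set String)
    (suff : PySem.Dict String (PySem.Set String)) (ptr : PySem.Dict String Nat)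
    (k v : String)
    (h2 : ∀ n, d.contains n = pvUsedB plain suff n)
    (h3 : ∀ (b : String) (j : ℕ), 1 ≤ j → j < ptr.getD b 1 →
      (suff.getD b PySem.Set.empty).contains (PySem.Int.toStr (j : Int)) = true)
    (h4 : ∀ b : String, 1 ≤ ptr.getD b 1)
    (hdup : d.contains k = true) :
    pvInv (d.insert (pvCand k (pvUniq d k (d.size + 1) 0)) v)
      ((pvRename d suff ptr (k, v)).1, plain,
       (pvRename d suff ptr (k, v)).2.1, (pvRename d suff ptr (k, v)).2.2) := by
  obtain ⟨jw, hjw1, hjw2⟩ := pv_exists_free d k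
  have hex : ∃ j, d.contains (pvCand k j) = false := ⟨jw, hjw2⟩
  have hj0f : d.contains (pvCand k (Nat.find hex)) = false := Nat.find_spec hex
  set j0 := Nat.find hex with hj0
  have hj0min : ∀ i < j0, d.contains (pvCand k i) = true := by
    intro i hi
    cases hh : d.contains (pvCand k i) with
    | false => exact absurd hh (Nat.find_min hex hi)
    | true => rfl
  have hj0le : j0 ≤ d.size := le_trans (Nat.find_min' hex hjw2) hjw1
  have hA : pvUniq d k (d.size + 1) 0 = j0 :=
    pvUniq_eq d k j0 hj0f hj0min (d.size + 1) 0 (by omega) (by omega)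
  have hj0pos : 1 ≤ j0 := by
    by_contra hh
    push Not at hh
    have h0 : j0 = 0 := by omega
    rw [h0] at hj0f
    have hck : pvCand k 0 = k := by unfold pvCand; simp
    rw [hck, hdup] at hj0f
    exact Bool.noConfusion hj0f
  have hbr : ∀ j : ℕ, 1 ≤ j → d.contains (pvCand k j) =
      (suff.getD k PySem.Set.empty).contains (PySem.Int.toStr (j : Int)) := by
    intro j hj
    have hcand : pvCand k j = k ++ "_" ++ PySem.Int.toStr (j : Int) := by
      unfold pvCand; rw [if_neg (by omega)]
    rw [hcand, h2]
    unfold pvUsedB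
    rw [pv_canon_cand k j hj, Option.elim_some]
  have hp1 : 1 ≤ ptr.getD k 1 := h4 k
  have hp0le : ptr.getD k 1 ≤ j0 := by
    by_contra hh
    push Not at hh
    have h1' := h3 k j0 hj0pos hh
    rw [← hbr j0 hj0pos, hj0f] at h1'
    exact Bool.noConfusion h1'
  have hused : ∀ i, ptr.getD k 1 ≤ i → i < j0 →
      (suff.getD k PySem.Set.empty).contains (PySem.Int.toStr (i : Int)) = true := by
    intro i hi1 hi2
    have hh := hj0min i hi2
    rwa [hbr i (by omega)] at hh
  have hfree : (suff.getD k PySem.Set.empty).contains (PySem.Int.toStr (j0 : Int)) = false := by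
    rw [← hbr j0 hj0pos]; exact hj0f
  have hbound := pv_skip_bound (suff.getD k PySem.Set.empty) (ptr.getD k 1) j0 hused
  have hB : pvSkip (suff.getD k PySem.Set.empty)
      ((suff.getD k PySem.Set.empty).length + 1) (ptr.getD k 1) = j0 :=
    pvSkip_eq _ j0 hfree _ _ hused hp0le (by omega)
  have hname : pvCand k j0 = k ++ "_" ++ PySem.Int.toStr (j0 : Int) := by
    unfold pvCand; rw [if_neg (by omega)]
  have hr : pvRename d suff ptr (k, v) =
      (d.insert (k ++ "_" ++ PySem.Int.toStr (j0 : Int)) v,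
       suff.insert k ((suff.getD k PySem.Set.empty).add (PySem.Int.toStr (j0 : Int))),
       ptr.insert k (j0 + 1)) := by
    unfold pvRename
    dsimp only
    rw [hB]
  rw [hA, hname, hr]
  refine ⟨rfl, ?_, ?_, ?_⟩
  · intro n
    dsimp only
    by_cases hn : n = k ++ "_" ++ PySem.Int.toStr (j0 : Int)
    · subst hn
      rw [PySem.Dict.contains_insert_self]
      unfold pvUsedB
      rw [pv_canon_cand k j0 hj0pos, Option.elim_some]
      dsimp only
      rw [PySem.Dict.getD_insert, if_pos rfl]
      exact pv_contains_add_self.symm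
    · rw [PySem.Dict.contains_insert]
      have hne : (n == k ++ "_" ++ PySem.Int.toStr (j0 : Int)) = false := by
        simp [hn]
      rw [hne, Bool.false_or, h2]
      unfold pvUsedB
      cases hcn : pvCanon n with
      | none => rw [Option.elim_none, Option.elim_none]
      | some bs =>
        obtain ⟨b, s⟩ := bs
        rw [Option.elim_some, Option.elim_some]
        dsimp only
        rw [PySem.Dict.getD_insert]
        by_cases hb : b = k
        · subst hb
          rw [if_pos rfl]
          by_cases hs : s = PySem.Int.toStr (j0 : Int)
          · exfalso
            apply hn
            subst hs
            exact pv_canon_inj n _ b _ hcn (pv_canon_cand b j0 hj0pos)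
          · rw [pv_contains_add_ne hs]
        · rw [if_neg hb]
  · intro b j hj1 hj2
    dsimp only at hj2 ⊢
    rw [PySem.Dict.getD_insert] at hj2
    rw [PySem.Dict.getD_insert]
    by_cases hb : b = k
    · rw [if_pos hb] at hj2
      rw [if_pos hb]
      subst hb
      rcases Nat.lt_or_ge j (ptr.getD b 1) with hcase | hcase
      · exact pv_contains_add_mono (h3 b j hj1 hcase)
      · rcases Nat.lt_or_ge j j0 with hc2 | hc2
        · exact pv_contains_add_mono (hused j hcase hc2)
        · have hje : j = j0 := by omega
          subst hje
          exact pv_contains_add_self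
    · rw [if_neg hb] at hj2
      rw [if_neg hb]
      exact h3 b j hj1 hj2
  · intro b
    dsimp only
    rw [PySem.Dict.getD_insert]
    by_cases hb : b = k
    · rw [if_pos hb]; omega
    · rw [if_neg hb]; exact h4 b

lemma pv_step (d : PySem.Dict String String)
    (st : PySem.Dict String String × PySem.Set String ×
          PySem.Dict String (PySem.Set String) × PySem.Dict String Nat)
    (kv : String × String) (h : pvInv d st) : pvInv (pvStepA d kv) (pvStepB st kv) := by
  obtain ⟨out, plain, suff, ptr⟩ := st
  obtain ⟨k, v⟩ := kv
  obtain ⟨h1, h2, h3, h4⟩ := h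
  dsimp only at h1 h2 h3 h4
  subst h1
  by_cases hig : k ∈ pvIgnoredKeys
  · have hA : pvIgnoredKeys.contains k = true := by simpa using hig
    have hBc : pvIgnoredSet.contains k = true := by
      rw [PySem.Set.contains_iff]
      exact (PySem.Set.mem_ofList _ _).mpr hig
    unfold pvStepA pvStepB
    dsimp only
    rw [hA, hBc, if_pos rfl, if_pos rfl]
    exact ⟨rfl, h2, h3, h4⟩
  · have hA : pvIgnoredKeys.contains k = false := by simpa using hig
    have hBc : pvIgnoredSet.contains k = false := by
      simp [pvIgnoredSet, PySem.Set.mem_ofList, hig]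
    unfold pvStepA pvStepB
    dsimp only
    rw [hA, hBc, if_neg (show ¬ (false = true) from by simp), if_neg (show ¬ (false = true) from by simp)]
    by_cases hdup : d.contains k = true
    · rw [if_pos hdup]
      cases hc : pvCanon k with
      | none =>
        have hpl : plain.contains k = true := by
          have hh := h2 k
          rw [hdup] at hh
          unfold pvUsedB at hh
          rw [hc, Option.elim_none] at hh
          exact hh.symm
        dsimp only
        rw [if_neg (by rw [hpl]; simp)]
        exact pv_collision d plain suff ptr k v h2 h3 h4 hdup
      | some bs =>
        obtain ⟨b, s⟩ := bs
        have hsu : (suff.getD b PySem.Set.empty).contains s = true := by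
          have hh := h2 k
          rw [hdup] at hh
          unfold pvUsedB at hh
          rw [hc, Option.elim_some] at hh
          exact hh.symm
        dsimp only
        rw [if_neg (by rw [hsu]; simp)]
        exact pv_collision d plain suff ptr k v h2 h3 h4 hdup
    · have hdf : d.contains k = false := by
        cases hcb : d.contains k
        · rfl
        · exact absurd hcb hdup
      rw [if_neg hdup]
      cases hc : pvCanon k with
      | none =>
        have hpl : plain.contains k = false := by
          have hh := h2 k
          rw [hdf] at hh
          unfold pvUsedB at hh
          rw [hc, Option.elim_none] at hh
          exact hh.symm
        dsimp only
        rw [if_pos (by rw [hpl]; simp)]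
        refine ⟨rfl, ?_, h3, h4⟩
        intro n
        dsimp only
        by_cases hn : n = k
        · subst hn
          rw [PySem.Dict.contains_insert_self]
          unfold pvUsedB
          rw [hc, Option.elim_none]
          exact pv_contains_add_self.symm
        · rw [PySem.Dict.contains_insert]
          have hne : (n == k) = false := by simp [hn]
          rw [hne, Bool.false_or, h2]
          unfold pvUsedB
          cases hcn : pvCanon n with
          | none =>
            rw [Option.elim_none, Option.elim_none, pv_contains_add_ne hn]
          | some bs =>
            obtain ⟨b, s⟩ := bs
            rw [Option.elim_some, Option.elim_some]
      | some bs =>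
        obtain ⟨b, s⟩ := bs
        have hsu : (suff.getD b PySem.Set.empty).contains s = false := by
          have hh := h2 k
          rw [hdf] at hh
          unfold pvUsedB at hh
          rw [hc, Option.elim_some] at hh
          exact hh.symm
        dsimp only
        rw [if_pos (by rw [hsu]; simp)]
        refine ⟨rfl, ?_, ?_, h4⟩
        · intro n
          dsimp only
          by_cases hn : n = k
          · subst hn
            rw [PySem.Dict.contains_insert_self]
            unfold pvUsedB
            rw [hc, Option.elim_some]
            dsimp only
            rw [PySem.Dict.getD_insert, if_pos rfl]
            exact pv_contains_add_self.symm
          · rw [PySem.Dict.contains_insert]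
            have hne : (n == k) = false := by simp [hn]
            rw [hne, Bool.false_or, h2]
            unfold pvUsedB
            cases hcn : pvCanon n with
            | none => rw [Option.elim_none, Option.elim_none]
            | some bs' =>
              obtain ⟨b', s'⟩ := bs'
              rw [Option.elim_some, Option.elim_some]
              dsimp only
              rw [PySem.Dict.getD_insert]
              by_cases hb : b' = b
              · subst hb
                rw [if_pos rfl]
                by_cases hs : s' = s
                · exfalso
                  apply hn
                  subst hs
                  exact pv_canon_inj n k b' s' hcn hc
                · rw [pv_contains_add_ne hs]
              · rw [if_neg hb]
        · intro b' j hj1 hj2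
          dsimp only at hj2 ⊢
          rw [PySem.Dict.getD_insert]
          by_cases hb : b' = b
          · rw [if_pos hb]
            subst hb
            exact pv_contains_add_mono (h3 b' j hj1 hj2)
          · rw [if_neg hb]
            exact h3 b' j hj1 hj2

lemma pv_fold (ps : List (String × String)) :
    ∀ (d : PySem.Dict String String)
      (st : PySem.Dict String String × PySem.Set String ×
            PySem.Dict String (PySem.Set String) × PySem.Dict String Nat),
    pvInv d st → pvInv (ps.foldl pvStepA d) (ps.foldl pvStepB st) := by
  induction ps with
  | nil => intro d st h; exact h
  | cons kv ps ih =>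
    intro d st h
    exact ih _ _ (pv_step d st kv h)

lemma pv_inv_init :
    pvInv PySem.Dict.empty (PySem.Dict.empty, PySem.Set.empty, PySem.Dict.empty, PySem.Dict.empty) := by
  refine ⟨rfl, ?_, ?_, ?_⟩
  · intro n
    rw [PySem.Dict.contains_empty]
    unfold pvUsedB
    cases hc : pvCanon n with
    | none => rfl
    | some bs =>
      obtain ⟨b, s⟩ := bs
      rw [Option.elim_some]
      dsimp only
      rw [PySem.Dict.getD_empty]
      rfl
  · intro b j hj1 hj2
    dsimp only at hj2
    rw [PySem.Dict.getD_empty] at hj2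
    omega
  · intro b
    dsimp only
    rw [PySem.Dict.getD_empty]

-- ===== VERDICT (by name: the statement is the Claim_ definition above) =====
theorem parse_object_pairs_spec : Claim_equal_parse_object_pairs := by
  intro pairs _
  unfold Spec_parse_object_pairs parse_object_pairs parse_object_pairs_alt
  have h := pv_fold pairs PySem.Dict.empty
    (PySem.Dict.empty, PySem.Set.empty, PySem.Dict.empty, PySem.Dict.empty) pv_inv_init
  rw [h.1]
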